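-- pv_equiv track=rewrite | github.com/dasomahn/codingtest | codingtest/카드데크 채우기.py | calc
-- ===== SOURCE A (Python) =====
-- def calc(lst):
--     point = 0
--
--     prev = -2
--     for i in range(len(lst)):
--         if lst[i]:
--             if i-1 != prev:
--                 point += i+1
--             prev = i
--
--     return point
-- ===== SOURCE B (Python) =====
-- def calc(lst):
--     # run-based scan: jump over each maximal run of equal truthiness;
--     # a truthy run starting at index i contributes i+1
--     total = 0
--     i = 0
--     n = len(lst)
--     while i < n:
--         j = i
--         while j < n and bool(lst[j]) == bool(lst[i]):
--             j += 1
--         if lst[i]: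
--             total += i + 1
--         i = j
--     return total
-- ===== Notes on version B (the rewrite author's own statement) =====
-- stated objective: alternative
-- what changed: B scans maximal runs of equal truthiness (groupby-style, jumping by run length) instead of A's per-index loop tracking the previous truthy index.
import Mathlib
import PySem

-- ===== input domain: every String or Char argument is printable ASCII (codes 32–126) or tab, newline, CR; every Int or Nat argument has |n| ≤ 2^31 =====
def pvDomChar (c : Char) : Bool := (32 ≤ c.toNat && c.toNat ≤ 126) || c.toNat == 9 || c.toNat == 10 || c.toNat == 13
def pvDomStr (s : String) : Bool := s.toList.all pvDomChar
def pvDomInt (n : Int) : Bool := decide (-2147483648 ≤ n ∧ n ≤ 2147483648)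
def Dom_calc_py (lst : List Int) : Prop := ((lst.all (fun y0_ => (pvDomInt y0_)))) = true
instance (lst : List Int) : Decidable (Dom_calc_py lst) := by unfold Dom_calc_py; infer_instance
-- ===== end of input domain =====

-- B replaces A's per-index scan (tracking the previous truthy index) by a run-based scan
-- that jumps over each maximal run of equal truthiness; same O(n) cost, different decomposition.

-- ===== PORT A =====
-- the loop body: state (point, prev), one element (i, lst[i])
def stepA (st : Int × Int) (p : Int × Int) : Int × Int :=
  if p.2 ≠ 0 then
    (if p.1 - 1 ≠ st.2 then (st.1 + (p.1 + 1), p.1) else (st.1, p.1))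
  else st

-- for i in range(len(lst)) with lst[i]: indices are always in range, so pyGetD is exact here
def calc_py (lst : List Int) : Int :=
  ((PySem.List.pyRange 0 lst.length 1).foldl
      (fun st i => stepA st (i, PySem.List.pyGetD lst i 0)) (0, -2)).1

-- ===== PORT B =====
-- inner while: the maximal prefix of xs whose truthiness equals that of the run head
def calc_py_alt_go (i : Int) : List Int → Int
  | [] => 0
  | x :: xs =>
    (if x ≠ 0 then i + 1 else 0) +
      calc_py_alt_go (i + 1 + ((xs.takeWhile (fun y => decide (y ≠ 0) == decide (x ≠ 0))).length : Int))
        (xs.dropWhile (fun y => decide (y ≠ 0) == decide (x ≠ 0)))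
termination_by l => l.length
decreasing_by
  exact Nat.lt_succ_of_le (List.length_dropWhile_le _ _)

def calc_py_alt (lst : List Int) : Int := calc_py_alt_go 0 lst

-- ===== PRECONDITION & SPEC =====
def Spec_calc_py (lst : List Int) (out : Int) : Prop := out = calc_py_alt lst
instance (lst : List Int) (out : Int) : Decidable (Spec_calc_py lst out) := by unfold Spec_calc_py; infer_instance

-- ===== CLAIM (what is proved, stated in full; the proofs are below) =====
def Claim_equal_calc_py : Prop := ∀ (lst : List Int), Dom_calc_py lst → Spec_calc_py lst (calc_py lst)

-- ===== LEMMAS AND PROOFS =====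

-- reference spec: position i, 'prev' = truthiness of the previous element
def fRun (i : Int) (prev : Bool) : List Int → Int
  | [] => 0
  | x :: xs => (if x ≠ 0 ∧ prev = false then i + 1 else 0) + fRun (i + 1) (decide (x ≠ 0)) xs

theorem calcA_foldl (lst : List Int) :
    ∀ (s point prev : Int), prev < s →
      ((PySem.List.enumerate lst s).foldl stepA (point, prev)).1
        = point + fRun s (decide (prev = s - 1)) lst := by
  induction lst with
  | nil => intro s point prev h; simp [PySem.List.enumerate_nil, fRun]
  | cons x xs ih =>
    intro s point prev h
    rw [PySem.List.enumerate_cons, List.foldl_cons]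
    by_cases hx : x ≠ 0
    · by_cases hp : s - 1 ≠ prev
      · have hstep : stepA (point, prev) (s, x) = (point + (s + 1), s) := by
          simp [stepA, hx, hp]
        rw [hstep, ih (s + 1) (point + (s + 1)) s (by omega)]
        have h1 : decide (prev = s - 1) = false := by simp; omega
        have h2 : decide (s = s + 1 - 1) = true := by simp
        simp only [fRun, hx, h1, h2, ne_eq, not_false_eq_true, true_and, if_pos, decide_true]
        ring
      · have hp' : s - 1 = prev := by omega
        have hstep : stepA (point, prev) (s, x) = (point, s) := by
          simp [stepA, hx, hp']
        rw [hstep, ih (s + 1) point s (by omega)]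
        have h1 : decide (prev = s - 1) = true := by simp; omega
        have h2 : decide (s = s + 1 - 1) = true := by simp
        simp [fRun, hx, h1]
    · have hx0 : x = 0 := by omega
      have hstep : stepA (point, prev) (s, x) = (point, prev) := by
        simp [stepA, hx0]
      rw [hstep, ih (s + 1) point prev (by omega)]
      have h1 : decide (prev = s) = false := by simp; omega
      simp [fRun, hx0, h1]

theorem calcA_eq_fRun (lst : List Int) : calc_py lst = fRun 0 false lst := by
  unfold calc_py
  have he : PySem.List.enumerate lst 0
      = (PySem.List.pyRange 0 (lst.length : Int) 1).map (fun j => (j, PySem.List.pyGetD lst j 0)) := by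
    simpa using PySem.List.enumerate_eq_map_pyRange lst 0
  have h2 : (PySem.List.pyRange 0 (lst.length : Int) 1).foldl
      (fun st i => stepA st (i, PySem.List.pyGetD lst i 0)) ((0 : Int), (-2 : Int))
      = (PySem.List.enumerate lst 0).foldl stepA ((0 : Int), (-2 : Int)) := by
    rw [he, List.foldl_map]
  rw [h2, calcA_foldl lst 0 0 (-2) (by omega)]
  norm_num

theorem fRun_run (run : List Int) :
    ∀ (rest : List Int) (j : Int) (k : Bool),
      (∀ y ∈ run, decide (y ≠ 0) = k) →
      fRun j k (run ++ rest) = fRun (j + (run.length : Int)) k rest := by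
  induction run with
  | nil => intro rest j k _; simp
  | cons y run' ih =>
    intro rest j k hk
    have hy : decide (y ≠ 0) = k := hk y (by simp)
    have hz : (if y ≠ 0 ∧ k = false then j + 1 else 0) = 0 := by
      cases k with
      | false => simp at hy; simp [hy]
      | true => simp
    simp only [List.cons_append, fRun, hz, hy, zero_add]
    rw [ih rest (j + 1) k (fun z hz => hk z (by simp [hz]))]
    have hlen : j + 1 + (run'.length : Int) = j + (((y :: run').length : Nat) : Int) := by
      simp [List.length_cons]; omega
    rw [hlen]

theorem altGo_eq_fRun :
    ∀ (n : Nat) (l : List Int), l.length ≤ n → ∀ (i : Int) (b : Bool),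
      (∀ x, l.head? = some x → b = true → x = 0) →
      calc_py_alt_go i l = fRun i b l := by
  intro n
  induction n with
  | zero =>
    intro l hl i b _
    have : l = [] := by cases l <;> simp_all
    subst this; simp [calc_py_alt_go, fRun]
  | succ n ih =>
    intro l hl i b hb
    cases l with
    | nil => simp [calc_py_alt_go, fRun]
    | cons x xs =>
      rw [calc_py_alt_go]
      set k := decide (x ≠ 0) with hk
      set run := xs.takeWhile (fun y => decide (y ≠ 0) == k) with hrun
      set rest := xs.dropWhile (fun y => decide (y ≠ 0) == k) with hrest
      have hsplit : xs = run ++ rest := (List.takeWhile_append_dropWhile).symm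
      have hmem : ∀ y ∈ run, decide (y ≠ 0) = k := by
        intro y hy
        have := List.mem_takeWhile_imp hy
        simpa using this
      have hrh : ∀ z, rest.head? = some z → k = true → z = 0 := by
        intro z hz hkt
        have hnp := List.head?_dropWhile_not (fun y => decide (y ≠ 0) == k) xs
        rw [← hrest, hz] at hnp
        simp only [hkt] at hnp
        simpa using hnp
      have hfst : (if x ≠ 0 then i + 1 else 0) = (if x ≠ 0 ∧ b = false then i + 1 else 0) := by
        by_cases hx : x ≠ 0
        · have hbf : b = false := by
            cases b with
            | false => rfl
            | true => exact absurd (hb x rfl rfl) hx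
          simp [hx, hbf]
        · simp [hx]
      have hlen : rest.length ≤ n := by
        have h1 : rest.length ≤ xs.length := by
          rw [hrest]; exact List.length_dropWhile_le _ _
        simp at hl
        omega
      rw [ih rest hlen _ k hrh]
      conv_rhs => rw [fRun, hsplit]
      rw [fRun_run run rest (i + 1) k hmem, hfst]

theorem altB_eq_fRun (lst : List Int) : calc_py_alt lst = fRun 0 false lst := by
  unfold calc_py_alt
  exact altGo_eq_fRun lst.length lst le_rfl 0 false (by simp)

-- ===== VERDICT (by name: the statement is the Claim_ definition above) =====
theorem calc_py_spec : Claim_equal_calc_py := by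
  intro lst _
  unfold Spec_calc_py
  rw [calcA_eq_fRun, altB_eq_fRun]
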